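-- pv_equiv track=rewrite | github.com/ELVIS-Project/vis-framework | vis/analyzers/indexers/contour.py | COM_matrix
-- ===== SOURCE A (Python) =====
-- def COM_matrix(contour):
--     """
--     Creates a matrix representing the contour given.
--     """
--     com = []
--
--     contour = contour.replace(' ', '')
--     contour = contour.replace('[', '')
--     contour = contour.replace(']', '')
--     contour = contour.split(',')
--
--     for x in contour:
--         com.append([])
--     for i in range(len(contour)):
--         for x in range(len(contour)):
--             if contour[i] == contour[x]:
--                 com[i].append("0")
--             elif contour[i] > contour[x]:
--                 com[i].append("-")
--             else:
--                 com[i].append("+")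
--
--     return com
-- ===== SOURCE B (Python) =====
-- def COM_matrix(contour):
--     """
--     Creates a matrix representing the contour given.
--
--     Pre-fills every cell with the equal-symbol and compares each unordered
--     pair of tokens once, writing the symbol and its mirror into the two
--     symmetric cells.
--     """
--     tokens = contour.replace(' ', '').replace('[', '').replace(']', '').split(',')
--     n = len(tokens)
--     com = [['0'] * n for _ in range(n)]
--     for i in range(n):
--         for j in range(i + 1, n):
--             a, b = tokens[i], tokens[j]
--             if a < b:
--                 com[i][j] = '+'
--                 com[j][i] = '-'
--             elif b < a:
--                 com[i][j] = '-'
--                 com[j][i] = '+'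
--     return com
-- ===== Notes on version B (the rewrite author's own statement) =====
-- stated objective: alternative
-- what changed: B pre-fills the whole matrix with the equal-symbol and compares each unordered pair of tokens once (i<j), writing the comparison symbol into one cell and its mirror into the symmetric cell, instead of A's full n-by-n double loop comparing every ordered pair.
import Mathlib
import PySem

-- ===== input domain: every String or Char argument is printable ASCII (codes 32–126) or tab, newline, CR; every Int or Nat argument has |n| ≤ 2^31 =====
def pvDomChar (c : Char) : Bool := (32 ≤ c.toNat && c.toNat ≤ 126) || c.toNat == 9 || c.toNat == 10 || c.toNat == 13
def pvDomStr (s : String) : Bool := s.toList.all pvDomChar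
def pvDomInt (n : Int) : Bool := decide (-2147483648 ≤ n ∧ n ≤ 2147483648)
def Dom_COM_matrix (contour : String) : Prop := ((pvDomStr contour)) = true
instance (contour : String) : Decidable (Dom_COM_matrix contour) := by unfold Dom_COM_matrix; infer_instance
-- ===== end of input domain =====

-- B pre-fills the matrix with the equal-symbol and compares each unordered pair of tokens once, mirroring the symbol into the symmetric cell (alternative decomposition, half the comparisons).

-- ===== PORT A =====
def COM_matrix (contour : String) : List (List String) :=
  let c1 := PySem.Str.replace contour " " ""
  let c2 := PySem.Str.replace c1 "[" ""
  let c3 := PySem.Str.replace c2 "]" ""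
  let cont := (PySem.Str.split? c3 ",").getD []
  let com : List (List String) := cont.foldl (fun acc _ => acc ++ [([] : List String)]) []
  (PySem.List.pyRange 0 (cont.length : Int) 1).foldl (fun com i =>
    (PySem.List.pyRange 0 (cont.length : Int) 1).foldl (fun com x =>
      if PySem.List.pyGetD cont i "" = PySem.List.pyGetD cont x "" then
        PySem.List.pySetD com i ((PySem.List.pyGetD com i []) ++ ["0"])
      else if PySem.List.pyGetD cont x "" < PySem.List.pyGetD cont i "" then
        PySem.List.pySetD com i ((PySem.List.pyGetD com i []) ++ ["-"])
      else
        PySem.List.pySetD com i ((PySem.List.pyGetD com i []) ++ ["+"])) com) com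

-- ===== PORT B =====
-- com[p][q] = v  (Python nested list item assignment, exact for in-range p, q)
def pySet2 (com : List (List String)) (p q : Int) (v : String) : List (List String) :=
  PySem.List.pySetD com p (PySem.List.pySetD (PySem.List.pyGetD com p []) q v)

def COM_matrix_alt (contour : String) : List (List String) :=
  let toks := (PySem.Str.split?
    (PySem.Str.replace (PySem.Str.replace (PySem.Str.replace contour " " "") "[" "") "]" "") ",").getD []
  let n := toks.length
  let com : List (List String) := List.replicate n (List.replicate n "0")
  (PySem.List.pyRange 0 (n : Int) 1).foldl (fun com i =>
    (PySem.List.pyRange (i + 1) (n : Int) 1).foldl (fun com j =>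
      if PySem.List.pyGetD toks i "" < PySem.List.pyGetD toks j "" then
        pySet2 (pySet2 com i j "+") j i "-"
      else if PySem.List.pyGetD toks j "" < PySem.List.pyGetD toks i "" then
        pySet2 (pySet2 com i j "-") j i "+"
      else com) com) com

-- ===== PRECONDITION & SPEC =====
def Spec_COM_matrix (contour : String) (out : List (List String)) : Prop := out = COM_matrix_alt contour
instance (contour : String) (out : List (List String)) : Decidable (Spec_COM_matrix contour out) := by unfold Spec_COM_matrix; infer_instance

-- ===== CLAIM (what is proved, stated in full; the proofs are below) =====
def Claim_equal_COM_matrix : Prop := ∀ (contour : String), Dom_COM_matrix contour → Spec_COM_matrix contour (COM_matrix contour)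

-- ===== LEMMAS AND PROOFS =====

-- the comparison symbol, as A computes it
def pvSym (a b : String) : String := if a = b then "0" else if b < a then "-" else "+"

-- the n×n matrix with entry (p,q) given by E
def pvMk (n : Nat) (E : Nat → Nat → String) : List (List String) :=
  (List.range n).map (fun p => (List.range n).map (fun q => E p q))

def pvSymAt (cs : List String) (p q : Nat) : String := pvSym (cs.getD p "") (cs.getD q "")

theorem pvMk_getD (n : Nat) (E : Nat → Nat → String) (p : Nat) (hp : p < n) :
    (pvMk n E).getD p [] = (List.range n).map (fun q => E p q) := by
  rw [List.getD_eq_getElem _ _ (by simpa [pvMk] using hp)]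
  simp [pvMk]

theorem pvMk_congr (n : Nat) (E E' : Nat → Nat → String)
    (h : ∀ p, p < n → ∀ q, q < n → E p q = E' p q) : pvMk n E = pvMk n E' := by
  unfold pvMk
  apply List.ext_getElem (by simp)
  intro p h1 h2
  simp only [List.getElem_map, List.getElem_range]
  apply List.ext_getElem (by simp)
  intro q g1 g2
  simp only [List.getElem_map, List.getElem_range]
  exact h p (by simpa using h1) q (by simpa using g1)

theorem map_range_set {α : Type} (n : Nat) (f : Nat → α) (j : Nat) (v : α) :
    ((List.range n).map f).set j v = (List.range n).map (fun q => if q = j then v else f q) := by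
  apply List.ext_getElem (by simp)
  intro q h1 h2
  simp only [List.getElem_set, List.getElem_map, List.getElem_range]
  by_cases hqj : q = j
  · subst hqj; simp
  · rw [if_neg (fun h => hqj h.symm), if_neg hqj]

theorem pvMk_set_row (n : Nat) (E : Nat → Nat → String) (i : Nat) (g : Nat → String) :
    (pvMk n E).set i ((List.range n).map g)
      = pvMk n (fun p q => if p = i then g q else E p q) := by
  unfold pvMk
  apply List.ext_getElem (by simp)
  intro p h1 h2
  simp only [List.getElem_set, List.getElem_map, List.getElem_range]
  by_cases hpi : p = i
  · subst hpi; simp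
  · rw [if_neg (fun h => hpi h.symm)]
    simp [hpi]

theorem pySet2_mk (n : Nat) (E : Nat → Nat → String) (i j : Nat) (hi : i < n) (hj : j < n)
    (v : String) :
    pySet2 (pvMk n E) (i : Int) (j : Int) v
      = pvMk n (fun p q => if p = i ∧ q = j then v else E p q) := by
  unfold pySet2
  rw [PySem.List.pyGetD_natCast, PySem.List.pySetD_natCast, PySem.List.pySetD_natCast,
    pvMk_getD n E i hi, map_range_set, pvMk_set_row]
  apply pvMk_congr
  intro p _ q _
  by_cases hp : p = i <;> by_cases hq : q = j <;> simp [hp, hq]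

-- A-side: building the list of n empty rows
theorem pvFoldl_snoc_nil (cs : List String) (init : List (List String)) :
    cs.foldl (fun acc _ => acc ++ [([] : List String)]) init
      = init ++ cs.map (fun _ => []) := by
  induction cs generalizing init with
  | nil => simp
  | cons t cs ih => simp [List.foldl_cons, ih]

-- A-side: appending one entry per token to row i
theorem pvRow_append_fold (i : Nat) (g : String → String) (cs : List String) :
    ∀ (com : List (List String)),
      cs.foldl (fun c t => c.set i ((c.getD i []) ++ [g t])) com
        = com.set i ((com.getD i []) ++ cs.map g) := by
  induction cs with
  | nil =>
    intro com
    rw [List.foldl_nil, List.map_nil, List.append_nil]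
    by_cases h : i < com.length
    · rw [List.getD_eq_getElem _ _ h, List.set_getElem_self]
    · rw [List.set_eq_of_length_le (by omega)]
  | cons t cs ih =>
    intro com
    by_cases h : i < com.length
    · have hX : ∀ X : List String, ((com.set i X).getD i []) = X := by
        intro X
        rw [List.getD_eq_getElem _ _ (by simpa using h), List.getElem_set_self (by simpa using h)]
      rw [List.foldl_cons, ih, hX, List.set_set, List.map_cons]
      congr 1
      rw [List.append_assoc]
      rfl
    · have hs : ∀ v, com.set i v = com := fun v => List.set_eq_of_length_le (by omega)
      rw [List.foldl_cons, hs, ih, hs, hs]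

-- conversion: a foldl over range(a, n) of ints is a foldl over the same Nat range
theorem pvFoldl_pyRange_nat {α : Type} (f : α → Int → α) (a n : Nat) (init : α) :
    (PySem.List.pyRange (a : Int) (n : Int) 1).foldl f init
      = (List.range' a (n - a)).foldl (fun acc (k : Nat) => f acc (k : Int)) init := by
  rw [PySem.List.pyRange_one, List.range'_eq_map_range, List.foldl_map, List.foldl_map]
  have h1 : ((n : Int) - (a : Int)).toNat = n - a := by omega
  rw [h1]
  congr 1

theorem pvFoldl_pyRange_zero_nat {α : Type} (f : α → Int → α) (n : Nat) (init : α) :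
    (PySem.List.pyRange 0 (n : Int) 1).foldl f init
      = (List.range n).foldl (fun acc (k : Nat) => f acc (k : Int)) init := by
  have h := pvFoldl_pyRange_nat f 0 n init
  simp only [Nat.cast_zero, Nat.sub_zero] at h
  rw [List.range_eq_range']
  exact h

-- A's inner loop body, written as a single row update
theorem pvStepA_eq (cs : List String) (iN : Nat) (com : List (List String)) :
    ((PySem.List.pyRange 0 (cs.length : Int) 1).foldl (fun com x =>
        if PySem.List.pyGetD cs (iN : Int) "" = PySem.List.pyGetD cs x "" then
          PySem.List.pySetD com (iN : Int) ((PySem.List.pyGetD com (iN : Int) []) ++ ["0"])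
        else if PySem.List.pyGetD cs x "" < PySem.List.pyGetD cs (iN : Int) "" then
          PySem.List.pySetD com (iN : Int) ((PySem.List.pyGetD com (iN : Int) []) ++ ["-"])
        else
          PySem.List.pySetD com (iN : Int) ((PySem.List.pyGetD com (iN : Int) []) ++ ["+"])) com)
      = com.set iN ((com.getD iN []) ++ cs.map (fun t => pvSym (cs.getD iN "") t)) := by
  rw [PySem.List.foldl_pyRange_zero_pyGetD' cs ""
    (fun com t =>
      if PySem.List.pyGetD cs (iN : Int) "" = t then
        PySem.List.pySetD com (iN : Int) ((PySem.List.pyGetD com (iN : Int) []) ++ ["0"])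
      else if t < PySem.List.pyGetD cs (iN : Int) "" then
        PySem.List.pySetD com (iN : Int) ((PySem.List.pyGetD com (iN : Int) []) ++ ["-"])
      else
        PySem.List.pySetD com (iN : Int) ((PySem.List.pyGetD com (iN : Int) []) ++ ["+"])) com]
  have hstep : (fun (c : List (List String)) (t : String) =>
      if PySem.List.pyGetD cs (iN : Int) "" = t then
        PySem.List.pySetD c (iN : Int) ((PySem.List.pyGetD c (iN : Int) []) ++ ["0"])
      else if t < PySem.List.pyGetD cs (iN : Int) "" then
        PySem.List.pySetD c (iN : Int) ((PySem.List.pyGetD c (iN : Int) []) ++ ["-"])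
      else
        PySem.List.pySetD c (iN : Int) ((PySem.List.pyGetD c (iN : Int) []) ++ ["+"]))
      = fun c t => c.set iN ((c.getD iN []) ++ [pvSym (cs.getD iN "") t]) := by
    funext c t
    simp only [PySem.List.pyGetD_natCast, PySem.List.pySetD_natCast, pvSym]
    split_ifs <;> rfl
  rw [hstep, pvRow_append_fold]

-- A's partial state: the first j rows are complete, the rest still empty
def pvStateA (cs : List String) (j : Nat) : List (List String) :=
  (cs.take j).map (fun a => cs.map (fun b => pvSym a b)) ++ (cs.drop j).map (fun _ => [])

theorem pvOuterA (cs : List String) :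
    ∀ (k j : Nat), j + k = cs.length →
      (List.range' j k).foldl
        (fun com iN => com.set iN ((com.getD iN []) ++ cs.map (fun t => pvSym (cs.getD iN "") t)))
        (pvStateA cs j)
      = pvStateA cs cs.length := by
  intro k
  induction k with
  | zero => intro j hj; rw [show j = cs.length by omega]; simp
  | succ k ih =>
    intro j hj
    have hjlt : j < cs.length := by omega
    rw [List.range'_succ, List.foldl_cons]
    beta_reduce
    have hlen : ((cs.take j).map (fun a => cs.map (fun b => pvSym a b))).length = j := by
      simp [List.length_take]; omega
    have hgd : (pvStateA cs j).getD j [] = [] := by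
      unfold pvStateA
      rw [List.getD_eq_getElem _ _ (by simp [List.length_take]; omega)]
      rw [List.getElem_append_right (by rw [hlen])]
      simp only [hlen, Nat.sub_self]
      simp
    have hset : (pvStateA cs j).set j (cs.map (fun t => pvSym (cs.getD j "") t))
        = pvStateA cs (j + 1) := by
      unfold pvStateA
      rw [List.set_append_right _ _ (by rw [hlen]), hlen]
      simp only [Nat.sub_self]
      rw [List.drop_eq_getElem_cons hjlt]
      simp only [List.map_cons, List.set_cons_zero]
      rw [List.take_succ, List.getElem?_eq_getElem hjlt]
      simp only [Option.toList_some, List.map_append, List.map_cons, List.map_nil,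
        List.append_assoc, List.singleton_append]
      rw [List.getD_eq_getElem _ _ hjlt]
    rw [hgd, List.nil_append, hset]
    exact ih (j + 1) (by omega)

theorem pvMap_eq_mk (cs : List String) :
    cs.map (fun a => cs.map (fun b => pvSym a b)) = pvMk cs.length (pvSymAt cs) := by
  unfold pvMk pvSymAt
  apply List.ext_getElem (by simp)
  intro p h1 h2
  simp only [List.getElem_map, List.getElem_range]
  apply List.ext_getElem (by simp)
  intro q g1 g2
  simp only [List.getElem_map, List.getElem_range]
  rw [List.getD_eq_getElem _ _ (by simpa using h1), List.getD_eq_getElem _ _ (by simpa using g1)]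

-- B-side entry functions: state after k full outer iterations / within outer iteration i
def pvEB (cs : List String) (k p q : Nat) : String :=
  if min p q < k then pvSymAt cs p q else "0"

def pvEBI (cs : List String) (i m p q : Nat) : String :=
  if min p q < i ∨ (min p q = i ∧ max p q < m) then pvSymAt cs p q else "0"

theorem pvReplicate_eq_mk (n : Nat) :
    List.replicate n (List.replicate n "0") = pvMk n (fun _ _ => "0") := by
  unfold pvMk
  apply List.ext_getElem (by simp)
  intro p h1 h2
  simp

-- one inner step of B: compare tokens i and q once, write the symbol and its mirror
theorem pvEBI_ext (cs : List String) (i q : Nat) (hiq : i < q) (p r : Nat)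
    (hA : ¬(p = q ∧ r = i)) (hB : ¬(p = i ∧ r = q)) :
    pvEBI cs i q p r = pvEBI cs i (q + 1) p r := by
  unfold pvEBI
  by_cases hc : min p r < i ∨ (min p r = i ∧ max p r < q)
  · rw [if_pos hc, if_pos (by rcases hc with h | h; exact Or.inl h; exact Or.inr ⟨h.1, by omega⟩)]
  · rw [if_neg hc, if_neg ?_]
    intro hc'
    rcases hc' with h | h
    · exact hc (Or.inl h)
    · have hmax : max p r = q := by
        rcases Nat.lt_or_ge (max p r) q with hm | hm
        · exact absurd (Or.inr ⟨h.1, hm⟩) hc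
        · omega
      have hmin : min p r = i := h.1
      rcases Nat.le_total p r with hle | hle
      · exact hB ⟨by omega, by omega⟩
      · exact hA ⟨by omega, by omega⟩

theorem pvEBI_succ_iq (cs : List String) (i q : Nat) (hiq : i < q) :
    pvEBI cs i (q + 1) i q = pvSymAt cs i q := by
  unfold pvEBI
  rw [if_pos (Or.inr ⟨by omega, by omega⟩)]

theorem pvEBI_succ_qi (cs : List String) (i q : Nat) (hiq : i < q) :
    pvEBI cs i (q + 1) q i = pvSymAt cs q i := by
  unfold pvEBI
  rw [if_pos (Or.inr ⟨by omega, by omega⟩)]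

theorem pvStepB (cs : List String) (i q : Nat) (hiq : i < q) (hq : q < cs.length) :
    (if PySem.List.pyGetD cs (i : Int) "" < PySem.List.pyGetD cs (q : Int) "" then
        pySet2 (pySet2 (pvMk cs.length (pvEBI cs i q)) (i : Int) (q : Int) "+") (q : Int) (i : Int) "-"
      else if PySem.List.pyGetD cs (q : Int) "" < PySem.List.pyGetD cs (i : Int) "" then
        pySet2 (pySet2 (pvMk cs.length (pvEBI cs i q)) (i : Int) (q : Int) "-") (q : Int) (i : Int) "+"
      else pvMk cs.length (pvEBI cs i q))
      = pvMk cs.length (pvEBI cs i (q + 1)) := by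
  have hi : i < cs.length := by omega
  simp only [PySem.List.pyGetD_natCast]
  split_ifs with h1 h2
  · rw [pySet2_mk _ _ _ _ hi hq, pySet2_mk _ _ _ _ hq hi]
    apply pvMk_congr
    intro p _ r _
    by_cases hA : p = q ∧ r = i
    · obtain ⟨hp, hr⟩ := hA
      rw [hp, hr, if_pos ⟨rfl, rfl⟩, pvEBI_succ_qi cs i q hiq]
      unfold pvSymAt pvSym
      rw [if_neg (Ne.symm (ne_of_lt h1)), if_pos h1]
    · rw [if_neg hA]
      by_cases hB : p = i ∧ r = q
      · obtain ⟨hp, hr⟩ := hB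
        rw [hp, hr, if_pos ⟨rfl, rfl⟩, pvEBI_succ_iq cs i q hiq]
        unfold pvSymAt pvSym
        rw [if_neg (ne_of_lt h1), if_neg (asymm h1)]
      · rw [if_neg hB]
        exact pvEBI_ext cs i q hiq p r hA hB
  · rw [pySet2_mk _ _ _ _ hi hq, pySet2_mk _ _ _ _ hq hi]
    apply pvMk_congr
    intro p _ r _
    by_cases hA : p = q ∧ r = i
    · obtain ⟨hp, hr⟩ := hA
      rw [hp, hr, if_pos ⟨rfl, rfl⟩, pvEBI_succ_qi cs i q hiq]
      unfold pvSymAt pvSym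
      rw [if_neg (ne_of_lt h2), if_neg (asymm h2)]
    · rw [if_neg hA]
      by_cases hB : p = i ∧ r = q
      · obtain ⟨hp, hr⟩ := hB
        rw [hp, hr, if_pos ⟨rfl, rfl⟩, pvEBI_succ_iq cs i q hiq]
        unfold pvSymAt pvSym
        rw [if_neg (Ne.symm (ne_of_lt h2)), if_pos h2]
      · rw [if_neg hB]
        exact pvEBI_ext cs i q hiq p r hA hB
  · have heq : cs.getD i "" = cs.getD q "" := le_antisymm (not_lt.mp h2) (not_lt.mp h1)
    apply pvMk_congr
    intro p _ r _
    by_cases hA : p = q ∧ r = i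
    · obtain ⟨hp, hr⟩ := hA
      rw [hp, hr, pvEBI_succ_qi cs i q hiq]
      unfold pvEBI pvSymAt pvSym
      rw [if_neg (by omega), if_pos heq.symm]
    · by_cases hB : p = i ∧ r = q
      · obtain ⟨hp, hr⟩ := hB
        rw [hp, hr, pvEBI_succ_iq cs i q hiq]
        unfold pvEBI pvSymAt pvSym
        rw [if_neg (by omega), if_pos heq]
      · exact pvEBI_ext cs i q hiq p r hA hB

theorem pvInnerB (cs : List String) (i : Nat) :
    ∀ (m q0 : Nat), i < q0 → q0 + m ≤ cs.length →
      (List.range' q0 m).foldl (fun com qN =>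
          if PySem.List.pyGetD cs (i : Int) "" < PySem.List.pyGetD cs ((qN : Nat) : Int) "" then
            pySet2 (pySet2 com (i : Int) ((qN : Nat) : Int) "+") ((qN : Nat) : Int) (i : Int) "-"
          else if PySem.List.pyGetD cs ((qN : Nat) : Int) "" < PySem.List.pyGetD cs (i : Int) "" then
            pySet2 (pySet2 com (i : Int) ((qN : Nat) : Int) "-") ((qN : Nat) : Int) (i : Int) "+"
          else com)
        (pvMk cs.length (pvEBI cs i q0))
      = pvMk cs.length (pvEBI cs i (q0 + m)) := by
  intro m
  induction m with
  | zero => intro q0 _ _; simp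
  | succ m ih =>
    intro q0 hq0 hle
    rw [List.range'_succ, List.foldl_cons]
    beta_reduce
    rw [pvStepB cs i q0 hq0 (by omega)]
    have h4 := ih (q0 + 1) (by omega) (by omega)
    have h3 : q0 + (m + 1) = q0 + 1 + m := by omega
    rw [h3]
    exact h4

theorem pvEBI_start (cs : List String) (i : Nat) :
    pvEBI cs i (i + 1) = pvEB cs i := by
  funext p q
  unfold pvEBI pvEB
  by_cases h : min p q < i
  · rw [if_pos (Or.inl h), if_pos h]
  · rw [if_neg h]
    by_cases h2 : p = i ∧ q = i
    · rw [if_pos (Or.inr ⟨by omega, by omega⟩), h2.1, h2.2]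
      simp [pvSymAt, pvSym]
    · rw [if_neg ?_]
      intro hc
      rcases hc with hc | hc
      · exact h hc
      · exact h2 ⟨by omega, by omega⟩

theorem pvEBI_end (cs : List String) (i : Nat) (hi : i < cs.length) :
    pvMk cs.length (pvEBI cs i cs.length) = pvMk cs.length (pvEB cs (i + 1)) := by
  apply pvMk_congr
  intro p hp q hq
  unfold pvEBI pvEB
  have : (min p q < i ∨ (min p q = i ∧ max p q < cs.length)) ↔ min p q < i + 1 := by
    constructor
    · intro h; rcases h with h | h <;> omega
    · intro h
      rcases Nat.lt_or_ge (min p q) i with h' | h'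
      · exact Or.inl h'
      · exact Or.inr ⟨by omega, by omega⟩
  simp only [this]

theorem pvOuterB (cs : List String) :
    ∀ (k j : Nat), j + k = cs.length →
      (List.range' j k).foldl (fun com (iN : Nat) =>
          (PySem.List.pyRange ((iN : Int) + 1) (cs.length : Int) 1).foldl (fun com x =>
            if PySem.List.pyGetD cs (iN : Int) "" < PySem.List.pyGetD cs x "" then
              pySet2 (pySet2 com (iN : Int) x "+") x (iN : Int) "-"
            else if PySem.List.pyGetD cs x "" < PySem.List.pyGetD cs (iN : Int) "" then
              pySet2 (pySet2 com (iN : Int) x "-") x (iN : Int) "+"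
            else com) com)
        (pvMk cs.length (pvEB cs j))
      = pvMk cs.length (pvEB cs cs.length) := by
  intro k
  induction k with
  | zero => intro j hj; rw [show j = cs.length by omega]; simp
  | succ k ih =>
    intro j hj
    have hjlt : j < cs.length := by omega
    rw [List.range'_succ, List.foldl_cons]
    beta_reduce
    have hcast : ((j : Int) + 1) = ((j + 1 : Nat) : Int) := by push_cast; ring
    rw [hcast, pvFoldl_pyRange_nat]
    beta_reduce
    rw [← pvEBI_start cs j]
    rw [pvInnerB cs j (cs.length - (j + 1)) (j + 1) (by omega) (by omega)]
    have : (j + 1) + (cs.length - (j + 1)) = cs.length := by omega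
    rw [this, pvEBI_end cs j hjlt]
    exact ih (j + 1) (by omega)

theorem pvA_eq_mk (cs : List String) :
    (PySem.List.pyRange 0 (cs.length : Int) 1).foldl (fun com i =>
      (PySem.List.pyRange 0 (cs.length : Int) 1).foldl (fun com x =>
        if PySem.List.pyGetD cs i "" = PySem.List.pyGetD cs x "" then
          PySem.List.pySetD com i ((PySem.List.pyGetD com i []) ++ ["0"])
        else if PySem.List.pyGetD cs x "" < PySem.List.pyGetD cs i "" then
          PySem.List.pySetD com i ((PySem.List.pyGetD com i []) ++ ["-"])
        else
          PySem.List.pySetD com i ((PySem.List.pyGetD com i []) ++ ["+"])) com)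
      (cs.foldl (fun acc _ => acc ++ [([] : List String)]) [])
    = pvMk cs.length (pvSymAt cs) := by
  rw [pvFoldl_pyRange_zero_nat]
  beta_reduce
  have hbody : (fun (com : List (List String)) (k : Nat) =>
      (PySem.List.pyRange 0 (cs.length : Int) 1).foldl (fun com x =>
        if PySem.List.pyGetD cs (k : Int) "" = PySem.List.pyGetD cs x "" then
          PySem.List.pySetD com (k : Int) ((PySem.List.pyGetD com (k : Int) []) ++ ["0"])
        else if PySem.List.pyGetD cs x "" < PySem.List.pyGetD cs (k : Int) "" then
          PySem.List.pySetD com (k : Int) ((PySem.List.pyGetD com (k : Int) []) ++ ["-"])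
        else
          PySem.List.pySetD com (k : Int) ((PySem.List.pyGetD com (k : Int) []) ++ ["+"])) com)
      = fun com iN => com.set iN ((com.getD iN []) ++ cs.map (fun t => pvSym (cs.getD iN "") t)) := by
    funext com iN
    exact pvStepA_eq cs iN com
  rw [hbody, pvFoldl_snoc_nil, List.nil_append]
  have hinit : cs.map (fun _ => ([] : List String)) = pvStateA cs 0 := by
    simp [pvStateA]
  rw [hinit, List.range_eq_range', pvOuterA cs cs.length 0 (by omega)]
  unfold pvStateA
  simp [pvMap_eq_mk]

theorem pvB_eq_mk (cs : List String) :
    (PySem.List.pyRange 0 (cs.length : Int) 1).foldl (fun com i =>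
      (PySem.List.pyRange (i + 1) (cs.length : Int) 1).foldl (fun com j =>
        if PySem.List.pyGetD cs i "" < PySem.List.pyGetD cs j "" then
          pySet2 (pySet2 com i j "+") j i "-"
        else if PySem.List.pyGetD cs j "" < PySem.List.pyGetD cs i "" then
          pySet2 (pySet2 com i j "-") j i "+"
        else com) com)
      (List.replicate cs.length (List.replicate cs.length "0"))
    = pvMk cs.length (pvSymAt cs) := by
  rw [pvFoldl_pyRange_zero_nat]
  beta_reduce
  rw [pvReplicate_eq_mk]
  have hinit : pvMk cs.length (fun _ _ => "0") = pvMk cs.length (pvEB cs 0) := by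
    apply pvMk_congr; intro p _ q _; simp [pvEB]
  rw [hinit, List.range_eq_range', pvOuterB cs cs.length 0 (by omega)]
  apply pvMk_congr
  intro p hp q hq
  simp [pvEB, Nat.lt_of_le_of_lt (Nat.min_le_left p q) hp]

-- ===== VERDICT (by name: the statement is the Claim_ definition above) =====
theorem COM_matrix_spec : Claim_equal_COM_matrix := by
  intro contour _
  unfold Spec_COM_matrix COM_matrix COM_matrix_alt
  rw [pvA_eq_mk, pvB_eq_mk]
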